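-- pv_equiv track=rewrite | github.com/alex0000-ops/Vysledky-algoritmov | prefixspan/psx_s_predpripravou.py | find_pattern_match_indices
-- ===== SOURCE A (Python) =====
-- def find_pattern_match_indices(pat, seq):
--     """Nájde indexy riadkov v sekvencii, ktoré matchujú vzor (zachováva poradie)."""
--     matched = []
--     pat_idx = 0
--     for tok, orig_idx in seq:
--         if pat_idx < len(pat) and tok == pat[pat_idx]:
--             matched.append(orig_idx)
--             pat_idx += 1
--     if pat_idx == len(pat):
--         return matched
--     return []
-- ===== SOURCE B (Python) =====
-- def find_pattern_match_indices(pat, seq):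
--     """Inverted-index matcher: one preprocessing pass builds, per token, the
--     posting list of (position, orig_idx) pairs; each pattern token is then
--     resolved by a binary search for the first posting after the previous
--     match, instead of scanning seq token by token."""
--     positions = {}
--     for i, (tok, orig) in enumerate(seq):
--         positions.setdefault(tok, []).append((i, orig))
--     matched = []
--     prev = -1
--     for p in pat:
--         lst = positions.get(p, [])
--         # binary search: first entry of lst with position > prev
--         lo, hi = 0, len(lst)
--         while lo < hi:
--             mid = (lo + hi) // 2
--             if lst[mid][0] <= prev:
--                 lo = mid + 1
--             else:
--                 hi = mid
--         if lo == len(lst):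
--             return []
--         prev, orig = lst[lo]
--         matched.append(orig)
--     return matched
-- ===== Notes on version B (the rewrite author's own statement) =====
-- stated objective: alternative
-- what changed: Replaces A's single seq-driven scan carrying a pattern index with the classic inverted-index algorithm: one preprocessing pass groups (position, orig_idx) posting lists per token, then each pattern token is resolved by a binary search for the first posting after the previous match.
import Mathlib
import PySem

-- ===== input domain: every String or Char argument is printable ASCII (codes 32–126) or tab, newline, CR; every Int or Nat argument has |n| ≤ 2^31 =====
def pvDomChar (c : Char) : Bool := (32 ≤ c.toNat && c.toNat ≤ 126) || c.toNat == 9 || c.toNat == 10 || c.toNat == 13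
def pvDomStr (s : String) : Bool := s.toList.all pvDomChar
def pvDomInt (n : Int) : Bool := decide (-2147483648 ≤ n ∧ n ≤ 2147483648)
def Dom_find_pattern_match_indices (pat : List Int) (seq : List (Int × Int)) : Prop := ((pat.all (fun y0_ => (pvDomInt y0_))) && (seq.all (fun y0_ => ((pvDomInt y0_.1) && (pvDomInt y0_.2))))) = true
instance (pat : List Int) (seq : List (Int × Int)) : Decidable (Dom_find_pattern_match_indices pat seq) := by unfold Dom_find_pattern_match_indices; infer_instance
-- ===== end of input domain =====

-- B replaces A's single seq-driven scan with an inverted index (token -> posting list of positions) plus binary search per pattern token; alternative algorithm, similar cost.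


-- ===== PORT A =====
-- one step of A's loop body: state = (matched, pat_idx); pat[pat_idx] guarded by pat_idx < len(pat)
def pvStepA (pat : List Int) (s : List Int × Nat) (tp : Int × Int) : List Int × Nat :=
  if s.2 < pat.length ∧ tp.1 = pat.getD s.2 0 then (s.1 ++ [tp.2], s.2 + 1) else s

def find_pattern_match_indices (pat : List Int) (seq : List (Int × Int)) : List Int :=
  let st := seq.foldl (pvStepA pat) ([], 0)
  if st.2 = pat.length then st.1 else []

-- ===== PORT B =====
-- build pass: positions.setdefault(tok, []).append((i, orig)) over enumerate(seq)
def pvBuild (seq : List (Int × Int)) : PySem.Dict Int (List (Int × Int)) :=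
  (PySem.List.enumerate seq 0).foldl
    (fun d p => d.modify p.2.1 [] (· ++ [(p.1, p.2.2)])) PySem.Dict.empty

-- Source B's hand-written while loop: lo, hi binary search for the first entry with position > prev
-- (lst[mid] is always in range since lo < hi ≤ len(lst); getD is exact there)
def pvBisect (lst : List (Int × Int)) (prev : Int) (lo hi : Nat) : Nat :=
  if lo < hi then
    let mid := (lo + hi) / 2
    if (lst.getD mid (0, 0)).1 ≤ prev then pvBisect lst prev (mid + 1) hi
    else pvBisect lst prev lo mid
  else lo
termination_by hi - lo
decreasing_by all_goals omega

-- Source B's outer loop over the pattern (none = early `return []`)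
def pvLoopB (D : PySem.Dict Int (List (Int × Int))) : List Int → Int → Option (List Int)
  | [], _ => some []
  | p :: ps, prev =>
    let lst := D.getD p []
    let lo := pvBisect lst prev 0 lst.length
    if lo = lst.length then none
    else
      let x := lst.getD lo (0, 0)
      (pvLoopB D ps x.1).map (x.2 :: ·)

def find_pattern_match_indices_alt (pat : List Int) (seq : List (Int × Int)) : List Int :=
  (pvLoopB (pvBuild seq) pat (-1)).getD []

-- ===== PRECONDITION & SPEC =====
def Spec_find_pattern_match_indices (pat : List Int) (seq : List (Int × Int)) (out : List Int) : Prop := out = find_pattern_match_indices_alt pat seq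
instance (pat : List Int) (seq : List (Int × Int)) (out : List Int) : Decidable (Spec_find_pattern_match_indices pat seq out) := by unfold Spec_find_pattern_match_indices; infer_instance

-- ===== CLAIM (what is proved, stated in full; the proofs are below) =====
def Claim_equal_find_pattern_match_indices : Prop := ∀ (pat : List Int) (seq : List (Int × Int)), Dom_find_pattern_match_indices pat seq → Spec_find_pattern_match_indices pat seq (find_pattern_match_indices pat seq)

-- ===== LEMMAS AND PROOFS =====

-- proof-side greedy specification, shared middle ground between A and B:
-- scan for the first element with token p, return its orig_idx and the suffix past it
def pvScanFor (p : Int) : List (Int × Int) → Option (Int × List (Int × Int))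
  | [] => none
  | (tok, oi) :: rest => if tok = p then some (oi, rest) else pvScanFor p rest

def pvMatchAll : List Int → List (Int × Int) → Option (List Int)
  | [], _ => some []
  | p :: ps, seq =>
    match pvScanFor p seq with
    | none => none
    | some (oi, rest) => (pvMatchAll ps rest).map (oi :: ·)

-- posting list of token p over l with positions starting at base b
def pvPost (p : Int) : Int → List (Int × Int) → List (Int × Int)
  | _, [] => []
  | b, (tok, oi) :: rest => if tok = p then (b, oi) :: pvPost p (b + 1) rest else pvPost p (b + 1) rest

-- ---------- A = pvMatchAll ----------

theorem pvFoldA_done (pat : List Int) (seq : List (Int × Int)) (acc : List Int) :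
    seq.foldl (pvStepA pat) (acc, pat.length) = (acc, pat.length) := by
  induction seq generalizing acc with
  | nil => rfl
  | cons tp rest ih =>
    simp only [List.foldl_cons, pvStepA]
    rw [if_neg (by simp)]
    exact ih acc

theorem pvMain (seq : List (Int × Int)) : ∀ (pat : List Int) (k : Nat) (acc : List Int),
    k ≤ pat.length →
    (match pvMatchAll (pat.drop k) seq with
     | some m => seq.foldl (pvStepA pat) (acc, k) = (acc ++ m, pat.length)
     | none => (seq.foldl (pvStepA pat) (acc, k)).2 ≠ pat.length) := by
  induction seq with
  | nil =>
    intro pat k acc hk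
    by_cases h : k = pat.length
    · subst h; simp [pvMatchAll]
    · have hlt : k < pat.length := lt_of_le_of_ne hk h
      have hdrop : pat.drop k = pat[k] :: pat.drop (k + 1) := List.drop_eq_getElem_cons hlt
      simp only [hdrop, pvMatchAll, pvScanFor, List.foldl_nil]
      exact h
  | cons tp rest ih =>
    intro pat k acc hk
    by_cases hend : k = pat.length
    · subst hend
      simp only [List.drop_length, pvMatchAll]
      simpa using pvFoldA_done pat (tp :: rest) acc
    · have hlt : k < pat.length := lt_of_le_of_ne hk hend
      have hdrop : pat.drop k = pat[k] :: pat.drop (k + 1) := List.drop_eq_getElem_cons hlt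
      have hgetD : pat.getD k 0 = pat[k] := by
        simp [List.getD, List.getElem?_eq_getElem hlt]
      by_cases hm : tp.1 = pat[k]
      · have hstep : pvStepA pat (acc, k) tp = (acc ++ [tp.2], k + 1) := by
          unfold pvStepA
          rw [if_pos ⟨hlt, by rw [hgetD]; exact hm⟩]
        have hscan : pvScanFor pat[k] (tp :: rest) = some (tp.2, rest) := by
          cases tp with
          | mk tok oi => simp [pvScanFor] at hm ⊢; simp [hm]
        have := ih pat (k + 1) (acc ++ [tp.2]) hlt
        simp only [List.foldl_cons, hstep, hdrop, pvMatchAll, hscan]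
        cases h2 : pvMatchAll (pat.drop (k + 1)) rest with
        | none => simpa [h2] using this
        | some m => simp only [h2] at this; simp [this]
      · have hstep : pvStepA pat (acc, k) tp = (acc, k) := by
          unfold pvStepA
          rw [if_neg (by rw [hgetD]; exact fun h => hm h.2)]
        have hscan : pvScanFor pat[k] (tp :: rest) = pvScanFor pat[k] rest := by
          cases tp with
          | mk tok oi =>
            simp [pvScanFor] at hm ⊢
            intro h; exact absurd h hm
        have := ih pat k acc hk
        simp only [hdrop, pvMatchAll] at this ⊢
        simp only [List.foldl_cons, hstep, hscan]
        exact this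

-- ---------- posting lists ----------

theorem pvPost_bounds (p : Int) : ∀ (l : List (Int × Int)) (b : Int) (x : Int × Int),
    x ∈ pvPost p b l → b ≤ x.1 ∧ x.1 < b + l.length := by
  intro l
  induction l with
  | nil => intro b x hx; simp [pvPost] at hx
  | cons a rest ih =>
    intro b x hx
    obtain ⟨tok, oi⟩ := a
    simp only [pvPost] at hx
    by_cases h : tok = p
    · rw [if_pos h] at hx
      rcases List.mem_cons.mp hx with h1 | h1
      · subst h1; simp
      · have := ih (b + 1) x h1; simp; omega
    · rw [if_neg h] at hx
      have := ih (b + 1) x hx; simp; omega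

theorem pvPost_mono (p : Int) : ∀ (l : List (Int × Int)) (b : Int),
    (pvPost p b l).Pairwise (fun a c => a.1 < c.1) := by
  intro l
  induction l with
  | nil => intro b; simp [pvPost]
  | cons a rest ih =>
    intro b
    obtain ⟨tok, oi⟩ := a
    simp only [pvPost]
    by_cases h : tok = p
    · rw [if_pos h]
      refine List.Pairwise.cons ?_ (ih (b + 1))
      intro x hx
      have := pvPost_bounds p rest (b + 1) x hx
      simp; omega
    · rw [if_neg h]; exact ih (b + 1)

theorem pvBuild_getD (t : Int) : ∀ (l : List (Int × Int)) (b : Int)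
    (d : PySem.Dict Int (List (Int × Int))),
    ((PySem.List.enumerate l b).foldl
      (fun d p => d.modify p.2.1 [] (· ++ [(p.1, p.2.2)])) d).getD t []
    = d.getD t [] ++ pvPost t b l := by
  intro l
  induction l with
  | nil => intro b d; simp [PySem.List.enumerate_nil, pvPost]
  | cons a rest ih =>
    intro b d
    obtain ⟨tok, oi⟩ := a
    rw [PySem.List.enumerate_cons, List.foldl_cons, ih (b + 1)]
    simp only [pvPost]
    by_cases h : tok = t
    · subst h
      rw [PySem.Dict.getD_modify, if_pos rfl, if_pos rfl]
      simp
    · rw [PySem.Dict.getD_modify, if_neg (fun hh => h hh.symm), if_neg h]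

-- ---------- takeWhile characterization ----------

theorem pvTW_le {α : Type} (q : α → Bool) (dflt : α) : ∀ (l : List α) (j : Nat),
    j < (l.takeWhile q).length → q (l.getD j dflt) = true := by
  intro l
  induction l with
  | nil => intro j h; simp at h
  | cons a rest ih =>
    intro j h
    rw [List.takeWhile_cons] at h
    by_cases hq : q a = true
    · rw [if_pos hq] at h
      cases j with
      | zero => simpa using hq
      | succ j => exact ih j (by simpa using h)
    · rw [if_neg hq] at h; simp at h
  
theorem pvTW_boundary {α : Type} (q : α → Bool) (dflt : α) : ∀ (l : List α),
    (l.takeWhile q).length < l.length →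
    q (l.getD (l.takeWhile q).length dflt) = false := by
  intro l
  induction l with
  | nil => intro h; simp at h
  | cons a rest ih =>
    intro h
    rw [List.takeWhile_cons] at h ⊢
    by_cases hq : q a = true
    · rw [if_pos hq] at h ⊢
      simpa using ih (by simpa using h)
    · rw [if_neg hq] at h ⊢
      simpa using hq

theorem pvDropWhile_eq_drop {α : Type} (q : α → Bool) : ∀ (l : List α),
    l.dropWhile q = l.drop (l.takeWhile q).length := by
  intro l
  induction l with
  | nil => rfl
  | cons a rest ih =>
    rw [List.dropWhile_cons, List.takeWhile_cons]
    by_cases hq : q a = true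
    · rw [if_pos hq, if_pos hq]
      simpa using ih
    · rw [if_neg hq, if_neg hq]
      rfl

-- ---------- binary search = takeWhile length ----------

theorem pvBisect_term (lst : List (Int × Int)) (prev : Int) (lo : Nat)
    (hl : lo ≤ lst.length)
    (hlo : ∀ j, j < lo → (lst.getD j (0, 0)).1 ≤ prev)
    (hhi : ∀ j, lo ≤ j → j < lst.length → prev < (lst.getD j (0, 0)).1) :
    lo = (lst.takeWhile (fun x => decide (x.1 ≤ prev))).length := by
  have htwle : (lst.takeWhile (fun x => decide (x.1 ≤ prev))).length ≤ lst.length :=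
    List.Sublist.length_le (List.takeWhile_sublist _)
  rcases Nat.lt_trichotomy lo ((lst.takeWhile (fun x => decide (x.1 ≤ prev))).length) with h | h | h
  · have h1 := pvTW_le (fun x => decide (x.1 ≤ prev)) (0, 0) lst lo h
    rw [decide_eq_true_eq] at h1
    have h2 := hhi lo (le_refl _) (by omega)
    omega
  · exact h
  · have h1 := pvTW_boundary (fun x => decide (x.1 ≤ prev)) (0, 0) lst (by omega)
    rw [decide_eq_false_iff_not] at h1
    have h2 := hlo _ h
    omega

theorem pvBisect_spec (lst : List (Int × Int)) (prev : Int)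
    (hmono : ∀ i j, i < j → j < lst.length →
      (lst.getD i (0, 0)).1 < (lst.getD j (0, 0)).1) :
    ∀ (fuel lo hi : Nat), hi - lo ≤ fuel → lo ≤ hi → hi ≤ lst.length →
    (∀ j, j < lo → (lst.getD j (0, 0)).1 ≤ prev) →
    (∀ j, hi ≤ j → j < lst.length → prev < (lst.getD j (0, 0)).1) →
    pvBisect lst prev lo hi = (lst.takeWhile (fun x => decide (x.1 ≤ prev))).length := by
  intro fuel
  induction fuel with
  | zero =>
    intro lo hi hf hlh hhl hlo hhi
    have heq : lo = hi := by omega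
    subst heq
    rw [pvBisect, if_neg (by omega)]
    exact pvBisect_term lst prev lo (by omega) hlo hhi
  | succ fuel ih =>
    intro lo hi hf hlh hhl hlo hhi
    by_cases hlt : lo < hi
    · rw [pvBisect, if_pos hlt]
      set mid := (lo + hi) / 2 with hmid
      have hmlo : lo ≤ mid := by omega
      have hmhi : mid < hi := by omega
      by_cases hc : (lst.getD mid (0, 0)).1 ≤ prev
      · rw [if_pos hc]
        refine ih (mid + 1) hi (by omega) (by omega) hhl ?_ hhi
        intro j hj
        by_cases hjm : j = mid
        · subst hjm; exact hc
        · by_cases hjlo : j < lo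
          · exact hlo j hjlo
          · exact le_of_lt (lt_of_lt_of_le (hmono j mid (by omega) (by omega)) hc)
      · rw [if_neg hc]
        refine ih lo mid (by omega) (by omega) (by omega) hlo ?_
        intro j hj hjl
        by_cases hjm : j = mid
        · subst hjm; omega
        · exact lt_trans (by omega) (hmono mid j (by omega) hjl)
    · rw [pvBisect, if_neg hlt]
      have heq : lo = hi := by omega
      subst heq
      exact pvBisect_term lst prev lo (by omega) hlo hhi

-- ---------- scan over a suffix = dropWhile over the posting list ----------

theorem pvDW_noop {α : Type} (q : α → Bool) (l : List α) (h : ∀ x ∈ l, q x = false) :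
    l.dropWhile q = l := by
  cases l with
  | nil => rfl
  | cons a rest =>
    rw [List.dropWhile_cons, h a (by simp)]
    rfl

theorem pvScanK (p : Int) : ∀ (l : List (Int × Int)) (b c : Int) (k : Nat),
    c = b + k - 1 →
    pvScanFor p (l.drop k)
      = (match (pvPost p b l).dropWhile (fun x => decide (x.1 ≤ c)) with
         | [] => none
         | x :: _ => some (x.2, l.drop ((x.1 - b).toNat + 1))) := by
  intro l
  induction l with
  | nil => intro b c k hc; simp [pvPost, pvScanFor]
  | cons a rest ih =>
    intro b c k hc
    obtain ⟨tok, oi⟩ := a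
    cases k with
    | zero =>
      simp only [List.drop_zero, pvPost, pvScanFor]
      by_cases h : tok = p
      · rw [if_pos h, if_pos h, List.dropWhile_cons]
        have : decide ((b, oi).1 ≤ c) = false := by simp; omega
        rw [this]
        simp
      · rw [if_neg h, if_neg h]
        have hnoop : (pvPost p (b + 1) rest).dropWhile (fun x => decide (x.1 ≤ c)) = pvPost p (b + 1) rest := by
          refine pvDW_noop _ _ ?_
          intro x hx
          have := pvPost_bounds p rest (b + 1) x hx
          simp; omega
        have ihr := ih (b + 1) (b + 1 + (0:Nat) - 1) 0 rfl
        have hnoop2 : (pvPost p (b + 1) rest).dropWhile (fun x => decide (x.1 ≤ b + 1 + (0:Nat) - 1)) = pvPost p (b + 1) rest := by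
          refine pvDW_noop _ _ ?_
          intro x hx
          have := pvPost_bounds p rest (b + 1) x hx
          simp; omega
        rw [List.drop_zero] at ihr
        rw [ihr, hnoop2, hnoop]
        cases hp : pvPost p (b + 1) rest with
        | nil => rfl
        | cons x xs =>
          have hxb : b + 1 ≤ x.1 := by
            have := pvPost_bounds p rest (b + 1) x (by rw [hp]; simp)
            omega
          have hnn : (x.1 - b).toNat = (x.1 - (b + 1)).toNat + 1 := by omega
          show some (x.2, rest.drop ((x.1 - (b + 1)).toNat + 1))
              = some (x.2, ((tok, oi) :: rest).drop ((x.1 - b).toNat + 1))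
          rw [hnn, List.drop_succ_cons]
    | succ k =>
      rw [List.drop_succ_cons]
      have hd : (pvPost p b ((tok, oi) :: rest)).dropWhile (fun x => decide (x.1 ≤ c))
          = (pvPost p (b + 1) rest).dropWhile (fun x => decide (x.1 ≤ c)) := by
        simp only [pvPost]
        by_cases h : tok = p
        · rw [if_pos h, List.dropWhile_cons]
          have : decide ((b, oi).1 ≤ c) = true := by simp; push_cast at hc ⊢; omega
          rw [this, if_pos rfl]
        · rw [if_neg h]
      rw [hd]
      have ihr := ih (b + 1) c k (by push_cast at hc ⊢; omega)
      rw [ihr]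
      cases hp : (pvPost p (b + 1) rest).dropWhile (fun x => decide (x.1 ≤ c)) with
      | nil => rfl
      | cons x xs =>
        have hxmem : x ∈ pvPost p (b + 1) rest := by
          have hsub := List.dropWhile_sublist (l := pvPost p (b + 1) rest) (p := fun x => decide (x.1 ≤ c))
          rw [hp] at hsub
          exact hsub.subset (by simp)
        have hxb : b + 1 ≤ x.1 := (pvPost_bounds p rest (b + 1) x hxmem).1
        have hnn : (x.1 - b).toNat = (x.1 - (b + 1)).toNat + 1 := by omega
        show some (x.2, rest.drop ((x.1 - (b + 1)).toNat + 1))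
            = some (x.2, ((tok, oi) :: rest).drop ((x.1 - b).toNat + 1))
        rw [hnn, List.drop_succ_cons]

-- ---------- B = pvMatchAll ----------

theorem pvMainB (seq : List (Int × Int)) : ∀ (ps : List Int) (k : Nat),
    pvLoopB (pvBuild seq) ps ((k : Int) - 1) = pvMatchAll ps (seq.drop k) := by
  intro ps
  induction ps with
  | nil => intro k; simp [pvLoopB, pvMatchAll]
  | cons p rest ih =>
    intro k
    have hlst : (pvBuild seq).getD p [] = pvPost p 0 seq := by
      have := pvBuild_getD p seq 0 PySem.Dict.empty
      simpa [pvBuild, PySem.Dict.getD_empty] using this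
    set lst := (pvBuild seq).getD p [] with hl
    have hmono : ∀ i j, i < j → j < lst.length →
        (lst.getD i (0, 0)).1 < (lst.getD j (0, 0)).1 := by
      intro i j hij hj
      have hp := pvPost_mono p seq 0
      rw [← hlst] at hp
      have hi : i < lst.length := lt_trans hij hj
      rw [List.getD_eq_getElem lst (0,0) hi, List.getD_eq_getElem lst (0,0) hj]
      exact (List.pairwise_iff_getElem.mp hp) i j hi hj hij
    have hbs := pvBisect_spec lst ((k : Int) - 1) hmono lst.length 0 lst.length
      (by omega) (by omega) (le_refl _)
      (by intro j hj; omega)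
      (by intro j hj hjl; omega)
    set tw := (lst.takeWhile (fun x => decide (x.1 ≤ (k : Int) - 1))).length with htw
    have hscan := pvScanK p seq 0 ((k : Int) - 1) k (by ring)
    have hdw : (pvPost p 0 seq).dropWhile (fun x => decide (x.1 ≤ (k : Int) - 1))
        = lst.drop tw := by
      rw [← hlst]
      exact pvDropWhile_eq_drop _ lst
    rw [hdw] at hscan
    show (if pvBisect lst ((k:Int)-1) 0 lst.length = lst.length then none
          else (pvLoopB (pvBuild seq) rest (lst.getD (pvBisect lst ((k:Int)-1) 0 lst.length) (0,0)).1).map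
            ((lst.getD (pvBisect lst ((k:Int)-1) 0 lst.length) (0,0)).2 :: ·))
        = pvMatchAll (p :: rest) (seq.drop k)
    rw [hbs]
    have htwle : tw ≤ lst.length := by
      exact List.Sublist.length_le (List.takeWhile_sublist _)
    by_cases hend : tw = lst.length
    · rw [if_pos hend]
      have : lst.drop tw = [] := by rw [hend]; simp
      rw [this] at hscan
      simp only [pvMatchAll, hscan]
    · rw [if_neg hend]
      have htwlt : tw < lst.length := by omega
      have hdrop : lst.drop tw = lst.getD tw (0,0) :: lst.drop (tw + 1) := by
        rw [List.getD_eq_getElem lst (0,0) htwlt]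
        exact List.drop_eq_getElem_cons htwlt
      rw [hdrop] at hscan
      set x := lst.getD tw (0,0) with hx
      have hxmem : x ∈ pvPost p 0 seq := by
        rw [← hlst, hx, List.getD_eq_getElem lst (0,0) htwlt]
        exact List.getElem_mem htwlt
      have hxb := pvPost_bounds p seq 0 x hxmem
      have hxk : x.1 = ((x.1.toNat + 1 : Nat) : Int) - 1 := by omega
      have ihr := ih (x.1.toNat + 1)
      simp only [pvMatchAll, hscan]
      rw [show ((x.1 - 0).toNat + 1) = x.1.toNat + 1 by omega]
      rw [← ihr, ← hxk]

-- ===== VERDICT (by name: the statement is the Claim_ definition above) =====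
theorem find_pattern_match_indices_spec : Claim_equal_find_pattern_match_indices := by
  unfold Claim_equal_find_pattern_match_indices
  intro pat seq _
  unfold Spec_find_pattern_match_indices find_pattern_match_indices find_pattern_match_indices_alt
  have hb := pvMainB seq pat 0
  norm_num at hb
  rw [hb]
  have h := pvMain seq pat 0 [] (Nat.zero_le _)
  simp only [List.drop_zero] at h
  cases hm : pvMatchAll pat seq with
  | some m =>
    simp only [hm] at h
    simp [h]
  | none =>
    simp only [hm] at h
    simp [h]
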